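-- pv_equiv track=rewrite | github.com/sanyahegde/hackai-project | backend/services/skill_scorer.py | match_concept_to_skill
-- ===== SOURCE A (Python) =====
-- def match_concept_to_skill(concept: str, skill_map: dict) -> str | None:
--     """Match a concept name to a skill, prioritizing stronger overlaps."""
--     concept_lower = concept.lower()
--     concept_words = set(concept_lower.split())
--
--     # Pass 1: concept is a substring of the skill name (strongest signal)
--     for skill_name in skill_map:
--         if concept_lower in skill_name.lower():
--             return skill_name
--
--     # Pass 2: skill name is a substring of the concept
--     for skill_name in skill_map:
--         if skill_name.lower() in concept_lower:
--             return skill_name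
--
--     # Pass 3: concept is a substring of the keywords
--     for skill_name, keywords in skill_map.items():
--         if concept_lower in keywords.lower():
--             return skill_name
--
--     # Pass 4: multi-word overlap — require at least 2 overlapping words
--     # to avoid spurious matches (e.g. "World Wide Web" → AWS via "web")
--     best_skill = None
--     best_overlap = 0
--     for skill_name, keywords in skill_map.items():
--         keyword_words = set(keywords.lower().split())
--         overlap = len(concept_words & keyword_words)
--         if overlap > best_overlap:
--             best_overlap = overlap
--             best_skill = skill_name
--     if best_skill and best_overlap >= 2:
--         return best_skill
--
--     return None
-- ===== SOURCE B (Python) =====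
-- def match_concept_to_skill(concept: str, skill_map: dict) -> str | None:
--     """Single pass: rank every skill by a priority key and keep the best one."""
--     concept_lower = concept.lower()
--     concept_words = set(concept_lower.split())
--
--     best = None  # (tier, overlap, skill_name)
--     for skill_name, keywords in skill_map.items():
--         name_lower = skill_name.lower()
--         if concept_lower in name_lower:
--             key = (0, 0)
--         elif name_lower in concept_lower:
--             key = (1, 0)
--         elif concept_lower in keywords.lower():
--             key = (2, 0)
--         else:
--             key = (3, len(concept_words & set(keywords.lower().split())))
--         if best is None or key[0] < best[0] or (key[0] == best[0] == 3 and key[1] > best[1]):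
--             best = (key[0], key[1], skill_name)
--
--     if best is not None and (best[0] < 3 or best[1] >= 2):
--         return best[2]
--     return None
-- ===== Notes on version B (the rewrite author's own statement) =====
-- stated objective: alternative
-- what changed: Replaces A's four sequential scans (substring-in-name, name-in-concept, substring-in-keywords, then a max-overlap scan) by a single pass that assigns every skill a priority key (tier 0-3, with word-overlap inside tier 3) and keeps the best key, selecting at the end.
import Mathlib
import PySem

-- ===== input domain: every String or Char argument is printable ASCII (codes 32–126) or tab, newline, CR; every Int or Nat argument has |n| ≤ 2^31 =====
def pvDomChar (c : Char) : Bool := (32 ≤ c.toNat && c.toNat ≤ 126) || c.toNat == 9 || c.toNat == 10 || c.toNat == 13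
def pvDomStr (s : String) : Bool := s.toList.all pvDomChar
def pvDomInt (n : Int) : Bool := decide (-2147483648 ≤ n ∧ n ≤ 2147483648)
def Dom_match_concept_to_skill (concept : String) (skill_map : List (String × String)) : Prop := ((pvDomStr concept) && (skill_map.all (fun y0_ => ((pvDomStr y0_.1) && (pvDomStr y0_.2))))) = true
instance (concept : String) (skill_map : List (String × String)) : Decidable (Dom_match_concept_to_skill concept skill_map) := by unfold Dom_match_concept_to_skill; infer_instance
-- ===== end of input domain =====

-- B replaces A's four sequential scans over the dict by ONE pass that ranks every skill
-- with a priority key (tier 0..3, word-overlap count inside tier 3) and keeps the best key;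
-- same cost, different decomposition (objective: alternative).

-- ===== PORT A =====
-- Pass 4 of A: the strict-improvement scan over word overlaps, then the final gate
-- ('if best_skill and best_overlap >= 2'; the 'best_skill' truthiness test is 's ≠ ""').
def aPass4 (cw : PySem.Set String) : List (String × String) → Option String → Int → Option String
  | [], best, bestov =>
      match best with
      | some s => if s ≠ "" ∧ 2 ≤ bestov then some s else none
      | none => none
  | p :: rest, best, bestov =>
      let o := PySem.Set.len (PySem.Set.inter cw (PySem.Set.ofList (PySem.Str.split₀ (PySem.Str.lower p.2))))
      if bestov < o then aPass4 cw rest (some p.1) o else aPass4 cw rest best bestov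

def match_concept_to_skill (concept : String) (skill_map : List (String × String)) : Option String :=
  let cl := PySem.Str.lower concept
  let cw : PySem.Set String := PySem.Set.ofList (PySem.Str.split₀ cl)
  -- Pass 1: concept in skill_name.lower()
  match skill_map.find? (fun p => PySem.Str.isIn cl (PySem.Str.lower p.1)) with
  | some p => some p.1
  | none =>
    -- Pass 2: skill_name.lower() in concept
    match skill_map.find? (fun p => PySem.Str.isIn (PySem.Str.lower p.1) cl) with
    | some p => some p.1
    | none =>
      -- Pass 3: concept in keywords.lower()
      match skill_map.find? (fun p => PySem.Str.isIn cl (PySem.Str.lower p.2)) with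
      | some p => some p.1
      | none => aPass4 cw skill_map none 0

-- ===== PORT B =====
-- priority key of one skill: (tier, overlap); lower tier is stronger, overlap only matters in tier 3
def bKey (cl : String) (cw : PySem.Set String) (p : String × String) : Nat × Int :=
  if PySem.Str.isIn cl (PySem.Str.lower p.1) then (0, 0)
  else if PySem.Str.isIn (PySem.Str.lower p.1) cl then (1, 0)
  else if PySem.Str.isIn cl (PySem.Str.lower p.2) then (2, 0)
  else (3, PySem.Set.len (PySem.Set.inter cw (PySem.Set.ofList (PySem.Str.split₀ (PySem.Str.lower p.2)))))

-- keep current best unless the new key is strictly better (smaller tier, or more overlap within tier 3)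
def bStep (cl : String) (cw : PySem.Set String) (best : Option (Nat × Int × String)) (p : String × String) : Option (Nat × Int × String) :=
  let k := bKey cl cw p
  match best with
  | none => some (k.1, k.2, p.1)
  | some (bt, bo, bs) =>
      if k.1 < bt ∨ (k.1 = bt ∧ bt = 3 ∧ bo < k.2) then some (k.1, k.2, p.1) else some (bt, bo, bs)

def match_concept_to_skill_alt (concept : String) (skill_map : List (String × String)) : Option String :=
  let cl := PySem.Str.lower concept
  let cw : PySem.Set String := PySem.Set.ofList (PySem.Str.split₀ cl)
  match skill_map.foldl (bStep cl cw) (none : Option (Nat × Int × String)) with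
  | none => none
  | some (bt, bo, bs) => if bt < 3 ∨ 2 ≤ bo then some bs else none

-- ===== PRECONDITION & SPEC =====
-- Pre_ excludes association lists with duplicate keys: a Python dict argument cannot contain
-- duplicates, so such lists do not represent any input of the original function.
def Pre_match_concept_to_skill (concept : String) (skill_map : List (String × String)) : Prop :=
  (skill_map.map Prod.fst).Nodup
instance (concept : String) (skill_map : List (String × String)) : Decidable (Pre_match_concept_to_skill concept skill_map) := by unfold Pre_match_concept_to_skill; infer_instance

def pvWitness_match_concept_to_skill : String × (List (String × String)) :=
  ("python", [("Python", "python programming"), ("AWS", "cloud aws")])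

def Spec_match_concept_to_skill (concept : String) (skill_map : List (String × String)) (out : Option String) : Prop := out = match_concept_to_skill_alt concept skill_map
instance (concept : String) (skill_map : List (String × String)) (out : Option String) : Decidable (Spec_match_concept_to_skill concept skill_map out) := by unfold Spec_match_concept_to_skill; infer_instance

-- ===== CLAIM (what is proved, stated in full; the proofs are below) =====
def Claim_equal_match_concept_to_skill : Prop := ∀ (concept : String) (skill_map : List (String × String)), Dom_match_concept_to_skill concept skill_map → Pre_match_concept_to_skill concept skill_map → Spec_match_concept_to_skill concept skill_map (match_concept_to_skill concept skill_map)

-- ===== LEMMAS AND PROOFS =====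

-- the key of a skill, by which of the three substring conditions holds first
theorem bKey_eq0 (cl : String) (cw : PySem.Set String) (p : String × String)
    (h1 : PySem.Str.isIn cl (PySem.Str.lower p.1) = true) : bKey cl cw p = (0, 0) := by
  simp only [bKey, h1, if_pos]

theorem bKey_eq1 (cl : String) (cw : PySem.Set String) (p : String × String)
    (h1 : PySem.Str.isIn cl (PySem.Str.lower p.1) = false)
    (h2 : PySem.Str.isIn (PySem.Str.lower p.1) cl = true) : bKey cl cw p = (1, 0) := by
  simp only [bKey, h1, h2, if_neg, if_pos, Bool.false_eq_true, not_false_eq_true]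

theorem bKey_eq2 (cl : String) (cw : PySem.Set String) (p : String × String)
    (h1 : PySem.Str.isIn cl (PySem.Str.lower p.1) = false)
    (h2 : PySem.Str.isIn (PySem.Str.lower p.1) cl = false)
    (h3 : PySem.Str.isIn cl (PySem.Str.lower p.2) = true) : bKey cl cw p = (2, 0) := by
  simp only [bKey, h1, h2, h3, if_neg, if_pos, Bool.false_eq_true, not_false_eq_true]

theorem bKey_eq3 (cl : String) (cw : PySem.Set String) (p : String × String)
    (h1 : PySem.Str.isIn cl (PySem.Str.lower p.1) = false)
    (h2 : PySem.Str.isIn (PySem.Str.lower p.1) cl = false)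
    (h3 : PySem.Str.isIn cl (PySem.Str.lower p.2) = false) :
    bKey cl cw p = (3, PySem.Set.len (PySem.Set.inter cw (PySem.Set.ofList (PySem.Str.split₀ (PySem.Str.lower p.2))))) := by
  simp only [bKey, h1, h2, h3, if_neg, Bool.false_eq_true, not_false_eq_true]

-- a skill whose name fails condition 2 has a nonempty name ("" is a substring of everything)
theorem name_ne_empty_of_not_c2 (cl : String) (p : String × String)
    (h2 : PySem.Str.isIn (PySem.Str.lower p.1) cl = false) : p.1 ≠ "" := by
  intro h
  rw [h] at h2
  simp [PySem.Str.lower, PySem.Chars.lower] at h2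

theorem one_le_bKey (cl : String) (cw : PySem.Set String) (p : String × String)
    (h1 : PySem.Str.isIn cl (PySem.Str.lower p.1) = false) : 1 ≤ (bKey cl cw p).1 := by
  simp only [bKey, h1]
  split_ifs <;> simp_all

theorem two_le_bKey (cl : String) (cw : PySem.Set String) (p : String × String)
    (h1 : PySem.Str.isIn cl (PySem.Str.lower p.1) = false)
    (h2 : PySem.Str.isIn (PySem.Str.lower p.1) cl = false) : 2 ≤ (bKey cl cw p).1 := by
  simp only [bKey, h1, h2]
  split_ifs <;> simp_all

-- once the best has tier bt < 3 and every remaining key has tier ≥ bt, the fold keeps it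
theorem fold_keep (cl : String) (cw : PySem.Set String) (bt : Nat) (bo : Int) (bs : String)
    (l : List (String × String)) (hbt : bt < 3) (hl : ∀ p ∈ l, bt ≤ (bKey cl cw p).1) :
    l.foldl (bStep cl cw) (some (bt, bo, bs)) = some (bt, bo, bs) := by
  induction l with
  | nil => rfl
  | cons p rest ih =>
    have hp := hl p (by simp)
    have hcond : ¬ ((bKey cl cw p).1 < bt ∨ ((bKey cl cw p).1 = bt ∧ bt = 3 ∧ bo < (bKey cl cw p).2)) := by
      rintro (h | ⟨_, h2, _⟩) <;> omega
    have hstep : bStep cl cw (some (bt, bo, bs)) p = some (bt, bo, bs) := by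
      simp only [bStep]
      rw [if_neg hcond]
    rw [List.foldl_cons, hstep]
    exact ih (fun q hq => hl q (by simp [hq]))

-- if every key in l has tier ≥ t, the fold from none yields none or a best of tier ≥ t
theorem fold_lb (cl : String) (cw : PySem.Set String) (t : Nat) (l : List (String × String))
    (acc : Option (Nat × Int × String))
    (hl : ∀ p ∈ l, t ≤ (bKey cl cw p).1)
    (hacc : acc = none ∨ ∃ bt bo bs, acc = some (bt, bo, bs) ∧ t ≤ bt) :
    l.foldl (bStep cl cw) acc = none ∨ ∃ bt bo bs, l.foldl (bStep cl cw) acc = some (bt, bo, bs) ∧ t ≤ bt := by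
  induction l generalizing acc with
  | nil => simpa using hacc
  | cons p rest ih =>
    rw [List.foldl_cons]
    refine ih _ (fun q hq => hl q (by simp [hq])) ?_
    right
    have hp := hl p (by simp)
    rcases hacc with rfl | ⟨bt, bo, bs, rfl, hbt⟩
    · exact ⟨(bKey cl cw p).1, (bKey cl cw p).2, p.1, rfl, hp⟩
    · simp only [bStep]
      split_ifs with h
      · exact ⟨(bKey cl cw p).1, (bKey cl cw p).2, p.1, rfl, hp⟩
      · exact ⟨bt, bo, bs, rfl, hbt⟩

-- the fold over l₁ ++ q :: l₂ installs q when everything in l₁ has a strictly weaker tier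
-- and nothing in l₂ can displace it
theorem fold_through (cl : String) (cw : PySem.Set String) (t : Nat) (ht : t < 3)
    (l₁ l₂ : List (String × String)) (q : String × String)
    (h₁ : ∀ p ∈ l₁, t + 1 ≤ (bKey cl cw p).1) (hq : bKey cl cw q = (t, 0))
    (h₂ : ∀ p ∈ l₂, t ≤ (bKey cl cw p).1) :
    (l₁ ++ q :: l₂).foldl (bStep cl cw) (none : Option (Nat × Int × String)) = some (t, 0, q.1) := by
  rw [List.foldl_append, List.foldl_cons]
  have hinstall : ∀ acc, (acc = none ∨ ∃ bt bo bs, acc = some (bt, bo, bs) ∧ t + 1 ≤ bt) →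
      bStep cl cw acc q = some (t, 0, q.1) := by
    rintro acc (rfl | ⟨bt, bo, bs, rfl, hbt⟩)
    · simp only [bStep, hq]
    · simp only [bStep, hq]
      rw [if_pos (Or.inl (by omega))]
  rcases fold_lb cl cw (t + 1) l₁ none h₁ (Or.inl rfl) with h | ⟨bt, bo, bs, h, hbt⟩
  · rw [h, hinstall none (Or.inl rfl)]
    exact fold_keep cl cw t 0 q.1 l₂ ht h₂
  · rw [h, hinstall _ (Or.inr ⟨bt, bo, bs, rfl, hbt⟩)]
    exact fold_keep cl cw t 0 q.1 l₂ ht h₂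

-- on an all-tier-3 list A's pass 4 and B's fold-with-selection agree
theorem pass4_eq (cl : String) (cw : PySem.Set String) (l : List (String × String))
    (hl : ∀ p ∈ l, PySem.Str.isIn cl (PySem.Str.lower p.1) = false ∧
          PySem.Str.isIn (PySem.Str.lower p.1) cl = false ∧
          PySem.Str.isIn cl (PySem.Str.lower p.2) = false)
    (acc : Option String) (bo : Int) (bs : String)
    (hacc : (acc = some bs ∧ bs ≠ "") ∨ (acc = none ∧ bo = 0)) :
    aPass4 cw l acc bo =
      (match l.foldl (bStep cl cw) (some (3, bo, bs)) with
       | none => none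
       | some (bt, bo', bs') => if bt < 3 ∨ 2 ≤ bo' then some bs' else none) := by
  induction l generalizing acc bo bs with
  | nil =>
    rcases hacc with ⟨rfl, hbs⟩ | ⟨rfl, rfl⟩
    · simp [aPass4, hbs]
    · simp [aPass4]
  | cons p rest ih =>
    obtain ⟨h1, h2, h3⟩ := hl p (by simp)
    have hrest : ∀ q ∈ rest, PySem.Str.isIn cl (PySem.Str.lower q.1) = false ∧
        PySem.Str.isIn (PySem.Str.lower q.1) cl = false ∧
        PySem.Str.isIn cl (PySem.Str.lower q.2) = false := fun q hq => hl q (by simp [hq])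
    have hne := name_ne_empty_of_not_c2 cl p h2
    rw [List.foldl_cons]
    simp only [aPass4, bStep, bKey_eq3 cl cw p h1 h2 h3]
    by_cases hbo : bo < PySem.Set.len (PySem.Set.inter cw (PySem.Set.ofList (PySem.Str.split₀ (PySem.Str.lower p.2))))
    · rw [if_pos hbo, if_pos (Or.inr ⟨trivial, trivial, hbo⟩)]
      exact ih hrest _ _ p.1 (Or.inl ⟨rfl, hne⟩)
    · rw [if_neg hbo, if_neg ?_]
      · exact ih hrest acc bo bs hacc
      · rintro (h | ⟨_, _, h⟩)
        · exact Nat.lt_irrefl _ h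
        · exact hbo h

-- ===== VERDICT (by name: the statement is the Claim_ definition above) =====
theorem match_concept_to_skill_spec : Claim_equal_match_concept_to_skill := by
  intro concept skill_map _ _
  unfold Spec_match_concept_to_skill
  simp only [match_concept_to_skill, match_concept_to_skill_alt]
  cases hf1 : skill_map.find? (fun p => PySem.Str.isIn (PySem.Str.lower concept) (PySem.Str.lower p.1)) with
  | some q =>
    obtain ⟨hq, l₁, l₂, rfl, hl₁⟩ := List.find?_eq_some_iff_append.1 hf1
    rw [fold_through (PySem.Str.lower concept) _ 0 (by omega) l₁ l₂ q
      (fun p hp => one_le_bKey _ _ p (by simpa using hl₁ p hp))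
      (bKey_eq0 _ _ q (by simpa using hq)) (fun p _ => Nat.zero_le _)]
    simp
  | none =>
    have hN1 : ∀ p ∈ skill_map, PySem.Str.isIn (PySem.Str.lower concept) (PySem.Str.lower p.1) = false := by
      intro p hp
      simpa using List.find?_eq_none.1 hf1 p hp
    cases hf2 : skill_map.find? (fun p => PySem.Str.isIn (PySem.Str.lower p.1) (PySem.Str.lower concept)) with
    | some q =>
      obtain ⟨hq, l₁, l₂, heq, hl₁⟩ := List.find?_eq_some_iff_append.1 hf2
      subst heq
      rw [fold_through (PySem.Str.lower concept) _ 1 (by omega) l₁ l₂ q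
        (fun p hp => two_le_bKey _ _ p (hN1 p (by simp [hp])) (by simpa using hl₁ p hp))
        (bKey_eq1 _ _ q (hN1 q (by simp)) (by simpa using hq))
        (fun p hp => one_le_bKey _ _ p (hN1 p (by simp [hp])))]
      simp
    | none =>
      have hN2 : ∀ p ∈ skill_map, PySem.Str.isIn (PySem.Str.lower p.1) (PySem.Str.lower concept) = false := by
        intro p hp
        simpa using List.find?_eq_none.1 hf2 p hp
      cases hf3 : skill_map.find? (fun p => PySem.Str.isIn (PySem.Str.lower concept) (PySem.Str.lower p.2)) with
      | some q =>
        obtain ⟨hq, l₁, l₂, heq, hl₁⟩ := List.find?_eq_some_iff_append.1 hf3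
        subst heq
        have h3l₁ : ∀ p ∈ l₁, 3 ≤ (bKey (PySem.Str.lower concept)
            (PySem.Set.ofList (PySem.Str.split₀ (PySem.Str.lower concept))) p).1 := by
          intro p hp
          rw [bKey_eq3 _ _ p (hN1 p (by simp [hp])) (hN2 p (by simp [hp])) (by simpa using hl₁ p hp)]
        rw [fold_through (PySem.Str.lower concept) _ 2 (by omega) l₁ l₂ q h3l₁
          (bKey_eq2 _ _ q (hN1 q (by simp)) (hN2 q (by simp)) (by simpa using hq))
          (fun p hp => two_le_bKey _ _ p (hN1 p (by simp [hp])) (hN2 p (by simp [hp])))]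
        simp
      | none =>
        have hN3 : ∀ p ∈ skill_map, PySem.Str.isIn (PySem.Str.lower concept) (PySem.Str.lower p.2) = false := by
          intro p hp
          simpa using List.find?_eq_none.1 hf3 p hp
        cases skill_map with
        | nil => rfl
        | cons p rest =>
          have h1 := hN1 p (by simp)
          have h2 := hN2 p (by simp)
          have h3 := hN3 p (by simp)
          have hrest : ∀ q ∈ rest,
              PySem.Str.isIn (PySem.Str.lower concept) (PySem.Str.lower q.1) = false ∧
              PySem.Str.isIn (PySem.Str.lower q.1) (PySem.Str.lower concept) = false ∧
              PySem.Str.isIn (PySem.Str.lower concept) (PySem.Str.lower q.2) = false :=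
            fun q hq => ⟨hN1 q (by simp [hq]), hN2 q (by simp [hq]), hN3 q (by simp [hq])⟩
          rw [List.foldl_cons]
          simp only [aPass4, bStep, bKey_eq3 (PySem.Str.lower concept) _ p h1 h2 h3]
          by_cases h0 : (0 : Int) < PySem.Set.len (PySem.Set.inter
              (PySem.Set.ofList (PySem.Str.split₀ (PySem.Str.lower concept)))
              (PySem.Set.ofList (PySem.Str.split₀ (PySem.Str.lower p.2))))
          · rw [if_pos h0]
            exact pass4_eq _ _ rest hrest (some p.1) _ p.1
              (Or.inl ⟨rfl, name_ne_empty_of_not_c2 _ p h2⟩)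
          · rw [if_neg h0]
            have hO : PySem.Set.len (PySem.Set.inter
                (PySem.Set.ofList (PySem.Str.split₀ (PySem.Str.lower concept)))
                (PySem.Set.ofList (PySem.Str.split₀ (PySem.Str.lower p.2)))) = 0 := by
              have : 0 ≤ PySem.Set.len (PySem.Set.inter
                  (PySem.Set.ofList (PySem.Str.split₀ (PySem.Str.lower concept)))
                  (PySem.Set.ofList (PySem.Str.split₀ (PySem.Str.lower p.2)))) := by
                simp [PySem.Set.len]
              omega
            rw [hO]
            exact pass4_eq _ _ rest hrest none 0 p.1 (Or.inr ⟨rfl, rfl⟩)
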